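-- pv_equiv track=rewrite | github.com/makhmudgaly/leetcode-solutions | 3917-count-indices-with-opposite-parity/3917-count-indices-with-opposite-parity.py | countOppositeParity
-- ===== SOURCE A (Python) =====
-- def countOppositeParity(nums: list[int]) -> list[int]:
--     res = []
--     for i in range(len(nums)):
--         is_odd = nums[i] % 2 == 0
--         count = 0
--         for j in range(i + 1, len(nums)):
--             count += is_odd != (nums[j] % 2 == 0)
--
--         res.append(count)
--
--     return res
-- ===== SOURCE B (Python) =====
-- def countOppositeParity(nums: list[int]) -> list[int]:
--     even = odd = 0
--     res = []
--     for x in reversed(nums):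
--         res.append(odd if x % 2 == 0 else even)
--         if x % 2 == 0:
--             even += 1
--         else:
--             odd += 1
--     res.reverse()
--     return res
-- ===== Notes on version B (the rewrite author's own statement) =====
-- stated objective: faster
-- what changed: Replaced the nested scan per index by a single right-to-left pass maintaining running even/odd suffix counts and reading off the opposite-parity count.
import Mathlib
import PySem

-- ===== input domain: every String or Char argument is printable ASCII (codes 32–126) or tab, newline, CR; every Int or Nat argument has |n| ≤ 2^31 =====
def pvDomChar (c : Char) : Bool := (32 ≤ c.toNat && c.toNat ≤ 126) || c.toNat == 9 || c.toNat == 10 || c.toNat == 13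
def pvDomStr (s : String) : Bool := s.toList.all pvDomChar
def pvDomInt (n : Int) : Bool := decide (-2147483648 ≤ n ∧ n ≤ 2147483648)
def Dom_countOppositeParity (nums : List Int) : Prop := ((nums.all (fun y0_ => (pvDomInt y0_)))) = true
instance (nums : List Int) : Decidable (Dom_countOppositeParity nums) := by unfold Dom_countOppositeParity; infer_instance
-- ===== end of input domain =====

-- B replaces A's nested scan per index by one right-to-left pass keeping running even/odd suffix counts (objective: faster).

-- ===== PORT A =====
def countOppositeParity (nums : List Int) : List Int :=
  (PySem.List.pyRange 0 (PySem.List.len nums)).foldl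
    (fun res i =>
      let is_odd := PySem.Int.mod (PySem.List.pyGetD nums i 0) 2 == 0
      let count := (PySem.List.pyRange (i + 1) (PySem.List.len nums)).foldl
        (fun count j =>
          count + (if is_odd != (PySem.Int.mod (PySem.List.pyGetD nums j 0) 2 == 0) then 1 else 0)) 0
      res ++ [count]) []

-- ===== PORT B =====
-- one backward pass over nums (foldl on the reversed list = Source B's 'for x in reversed(nums)');
-- prepending to res gives directly what Source B's append-then-final-reverse produces
def countOppositeParity_alt (nums : List Int) : List Int :=
  (nums.reverse.foldl
    (fun (st : List Int × Int × Int) x =>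
      match st with
      | (res, even, odd) =>
        ((if PySem.Int.mod x 2 == 0 then odd else even) :: res,
         (if PySem.Int.mod x 2 == 0 then even + 1 else even),
         (if PySem.Int.mod x 2 == 0 then odd else odd + 1)))
    (([] : List Int), (0 : Int), (0 : Int))).1

-- ===== PRECONDITION & SPEC =====
def Spec_countOppositeParity (nums : List Int) (out : List Int) : Prop := out = countOppositeParity_alt nums
instance (nums : List Int) (out : List Int) : Decidable (Spec_countOppositeParity nums out) := by unfold Spec_countOppositeParity; infer_instance

-- ===== CLAIM (what is proved, stated in full; the proofs are below) =====
def Claim_equal_countOppositeParity : Prop := ∀ (nums : List Int), Dom_countOppositeParity nums → Spec_countOppositeParity nums (countOppositeParity nums)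

-- ===== LEMMAS AND PROOFS =====

-- parity test both programs use ('is_odd' is A's name for 'x is even')
def pvEven (x : Int) : Bool := PySem.Int.mod x 2 == 0

-- number of elements of xs whose parity differs from x's
def pvCnt (x : Int) (xs : List Int) : Int := (xs.countP (fun y => pvEven x != pvEven y) : Int)

-- the common structural specification: each element gets its count over its tail
def pvSpecL : List Int → List Int
  | [] => []
  | x :: xs => pvCnt x xs :: pvSpecL xs

lemma pvCnt_cases (x : Int) (xs : List Int) :
    pvCnt x xs = if pvEven x then (xs.countP (fun y => !pvEven y) : Int)
                 else (xs.countP pvEven : Int) := by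
  unfold pvCnt
  by_cases h : pvEven x = true
  · simp only [h, if_pos]
    congr 1
    apply List.countP_congr
    intro y _
    simp
  · rw [Bool.not_eq_true] at h
    simp only [h, Bool.false_eq_true, if_false]
    congr 1
    apply List.countP_congr
    intro y _
    simp

lemma pvInner_closed (nums : List Int) (i : Int) (hi : 0 ≤ i) :
    (PySem.List.pyRange (i + 1) (PySem.List.len nums)).foldl
      (fun count j =>
        count + (if (PySem.Int.mod (PySem.List.pyGetD nums i 0) 2 == 0)
                    != (PySem.Int.mod (PySem.List.pyGetD nums j 0) 2 == 0) then 1 else 0)) 0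
      = pvCnt (PySem.List.pyGetD nums i 0) (nums.drop (i + 1).toNat) := by
  rw [PySem.List.foldl_pyRange_pyGetD nums 0
        (fun count y =>
          count + (if (PySem.Int.mod (PySem.List.pyGetD nums i 0) 2 == 0)
                      != (PySem.Int.mod y 2 == 0) then 1 else 0)) 0 (by omega)]
  rw [PySem.List.foldl_add]
  rw [PySem.List.sum_map_ite_one_zero]
  simp [pvCnt, pvEven]

lemma pvA_map_closed (nums : List Int) :
    (PySem.List.pyRange 0 (PySem.List.len nums)).map
      (fun i => (PySem.List.pyRange (i + 1) (PySem.List.len nums)).foldl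
        (fun count j =>
          count + (if (PySem.Int.mod (PySem.List.pyGetD nums i 0) 2 == 0)
                      != (PySem.Int.mod (PySem.List.pyGetD nums j 0) 2 == 0) then 1 else 0)) 0)
    = (PySem.List.pyRange 0 (PySem.List.len nums)).map
        (fun i => pvCnt (PySem.List.pyGetD nums i 0) (nums.drop (i + 1).toNat)) := by
  apply List.map_congr_left
  intro i hi
  rw [PySem.List.mem_pyRange_one] at hi
  exact pvInner_closed nums i hi.1

lemma pvA_map_spec (nums : List Int) :
    (PySem.List.pyRange 0 (PySem.List.len nums)).map
      (fun i => pvCnt (PySem.List.pyGetD nums i 0) (nums.drop (i + 1).toNat)) = pvSpecL nums := by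
  induction nums with
  | nil => simp [PySem.List.pyRange_one_eq_nil, pvSpecL, PySem.List.len]
  | cons x xs ih =>
    rw [PySem.List.pyRange_one_cons (a := 0) (by simp [PySem.List.len])]
    simp only [List.map_cons]
    unfold pvSpecL
    congr 1
    · -- head
      simp [PySem.List.pyGetD_zero_cons]
    · -- tail: shift the index by one
      rw [← ih]
      have hlen : PySem.List.len (x :: xs) = PySem.List.len xs + 1 := by
        simp [PySem.List.len]
      rw [hlen, show (0:Int) + 1 = 1 by ring]
      rw [PySem.List.pyRange_one (a := 1), PySem.List.pyRange_one (a := 0)]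
      simp only [add_sub_cancel_right, Int.sub_zero, List.map_map]
      apply List.map_congr_left
      intro k hk
      simp only [Function.comp]
      have hget : PySem.List.pyGetD (x :: xs) (1 + (k:Int)) 0 = PySem.List.pyGetD xs (0 + (k:Int)) 0 := by
        have h1 : (1 : Int) + (k : Int) = ((k + 1 : Nat) : Int) := by push_cast; ring
        have h2 : (0 : Int) + (k : Int) = ((k : Nat) : Int) := by ring
        rw [h1, h2, PySem.List.pyGetD_natCast, PySem.List.pyGetD_natCast]
        rfl
      have hdrop : (x :: xs).drop ((1 + (k:Int)) + 1).toNat = xs.drop ((0 + (k:Int)) + 1).toNat := by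
        have h1 : ((1 + (k:Int)) + 1).toNat = k + 2 := by omega
        have h2 : ((0 + (k:Int)) + 1).toNat = k + 1 := by omega
        rw [h1, h2]
        rfl
      rw [hget, hdrop]

lemma pvA_eq_spec (nums : List Int) : countOppositeParity nums = pvSpecL nums := by
  unfold countOppositeParity
  rw [PySem.List.foldl_append_singleton_eq_map]
  simp only [List.nil_append]
  rw [pvA_map_closed, pvA_map_spec]

lemma pvB_inv (nums : List Int) :
    nums.reverse.foldl
      (fun (st : List Int × Int × Int) x =>
        match st with
        | (res, even, odd) =>
          ((if PySem.Int.mod x 2 == 0 then odd else even) :: res,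
           (if PySem.Int.mod x 2 == 0 then even + 1 else even),
           (if PySem.Int.mod x 2 == 0 then odd else odd + 1)))
      (([] : List Int), (0 : Int), (0 : Int))
    = (pvSpecL nums, (nums.countP pvEven : Int), (nums.countP (fun y => !pvEven y) : Int)) := by
  rw [List.foldl_reverse]
  induction nums with
  | nil => simp [pvSpecL]
  | cons x xs ih =>
    rw [List.foldr_cons, ih]
    by_cases h : pvEven x = true
    · simp only [pvEven] at h
      simp only [h, if_true, pvSpecL, pvCnt_cases, pvEven, List.countP_cons]
      simp
    · rw [Bool.not_eq_true] at h
      simp only [pvEven] at h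
      simp only [h, Bool.false_eq_true, if_false, pvSpecL, pvCnt_cases, pvEven, List.countP_cons]
      simp
lemma pvB_eq_spec (nums : List Int) : countOppositeParity_alt nums = pvSpecL nums := by
  unfold countOppositeParity_alt
  rw [pvB_inv]

-- ===== VERDICT (by name: the statement is the Claim_ definition above) =====
theorem countOppositeParity_spec : Claim_equal_countOppositeParity := by
  intro nums _
  unfold Spec_countOppositeParity
  rw [pvA_eq_spec, pvB_eq_spec]
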